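-- pv_equiv track=rewrite | github.com/A89881/Summer-Internship-2025 | main.py | determine_K1
-- ===== SOURCE A (Python) =====
-- def determine_K1(max, R):
--     k_x_vals = []
--     k_y_vals = []
--     k_z_vals = []
--     for i in range(0, max+1):
--         for j in range(0, max+1):
--             for k in range(0, max+1):
--                 if 0 < i**2+j**2+k**2 <= R**2:
--                     k_x_vals.append(i)
--                     k_y_vals.append(j)
--                     k_z_vals.append(k)
--     # return [k_x_vals, k_y_vals, k_z_vals]
--     return k_x_vals, k_y_vals, k_z_vals
-- ===== SOURCE B (Python) =====
-- def determine_K1(max, R):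
--     R2 = R * R
--     pts = []
--     i = 0
--     while i <= max and i * i <= R2:
--         j = 0
--         while j <= max and i * i + j * j <= R2:
--             k = 1 if i == 0 and j == 0 else 0
--             while k <= max and i * i + j * j + k * k <= R2:
--                 pts.append((i, j, k))
--                 k += 1
--             j += 1
--         i += 1
--     return [p[0] for p in pts], [p[1] for p in pts], [p[2] for p in pts]
-- ===== Notes on version B (the rewrite author's own statement) =====
-- stated objective: faster
-- what changed: Instead of scanning the full (max+1)^3 cube and testing every lattice point, B walks only the points inside the sphere: each while-loop stops as soon as the running sum of squares exceeds R^2 (monotone in i, j, k), and the 0<... check is replaced by starting k at 1 when i=j=0; it collects triples in one list and unzips at the end.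
import Mathlib
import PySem

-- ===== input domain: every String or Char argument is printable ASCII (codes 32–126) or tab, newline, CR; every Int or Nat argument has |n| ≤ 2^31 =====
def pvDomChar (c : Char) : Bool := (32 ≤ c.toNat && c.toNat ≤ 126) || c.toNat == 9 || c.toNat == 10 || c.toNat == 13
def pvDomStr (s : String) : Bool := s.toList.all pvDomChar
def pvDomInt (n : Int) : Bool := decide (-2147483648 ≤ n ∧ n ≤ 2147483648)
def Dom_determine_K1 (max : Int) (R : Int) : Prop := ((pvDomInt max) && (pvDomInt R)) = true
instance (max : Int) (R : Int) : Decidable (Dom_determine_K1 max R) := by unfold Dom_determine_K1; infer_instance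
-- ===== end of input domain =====

-- B replaces A's full (max+1)^3 cube scan by while-loops that stop as soon as the
-- running sum of squares exceeds R^2, visiting only points inside the sphere (faster).

-- ===== PORT A =====
-- literal transliteration of A: three nested for-loops over range(0, max+1),
-- appending to three lists when 0 < i**2+j**2+k**2 <= R**2.
def determine_K1 (max : Int) (R : Int) : List Int × List Int × List Int :=
  (PySem.List.pyRange 0 (max+1) 1).foldl (fun s i =>
    (PySem.List.pyRange 0 (max+1) 1).foldl (fun s j =>
      (PySem.List.pyRange 0 (max+1) 1).foldl (fun s k =>
        if 0 < i^2 + j^2 + k^2 ∧ i^2 + j^2 + k^2 ≤ R^2 then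
          (s.1 ++ [i], s.2.1 ++ [j], s.2.2 ++ [k])
        else s) s) s) ([], [], [])

-- ===== PORT B =====
-- inner while loop: collect k from k0 upward while k <= max and i*i+j*j+k*k <= R2
def bLoopK (max R2 i j : Int) (k : Int) : List (Int × Int × Int) :=
  if h : k ≤ max ∧ i*i + j*j + k*k ≤ R2 then
    (i, j, k) :: bLoopK max R2 i j (k+1)
  else []
termination_by (max + 1 - k).toNat
decreasing_by obtain ⟨h1, -⟩ := h; omega

-- middle while loop over j
def bLoopJ (max R2 i : Int) (j : Int) : List (Int × Int × Int) :=
  if h : j ≤ max ∧ i*i + j*j ≤ R2 then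
    bLoopK max R2 i j (if i = 0 ∧ j = 0 then 1 else 0) ++ bLoopJ max R2 i (j+1)
  else []
termination_by (max + 1 - j).toNat
decreasing_by obtain ⟨h1, -⟩ := h; omega

-- outer while loop over i
def bLoopI (max R2 : Int) (i : Int) : List (Int × Int × Int) :=
  if h : i ≤ max ∧ i*i ≤ R2 then
    bLoopJ max R2 i 0 ++ bLoopI max R2 (i+1)
  else []
termination_by (max + 1 - i).toNat
decreasing_by obtain ⟨h1, -⟩ := h; omega

def determine_K1_alt (max : Int) (R : Int) : List Int × List Int × List Int :=
  let R2 := R * R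
  let pts := bLoopI max R2 0
  (pts.map (fun p => p.1), pts.map (fun p => p.2.1), pts.map (fun p => p.2.2))

-- ===== PRECONDITION & SPEC =====
def Spec_determine_K1 (max : Int) (R : Int) (out : List Int × List Int × List Int) : Prop := out = determine_K1_alt max R
instance (max : Int) (R : Int) (out : List Int × List Int × List Int) : Decidable (Spec_determine_K1 max R out) := by unfold Spec_determine_K1; infer_instance

-- ===== CLAIM (what is proved, stated in full; the proofs are below) =====
def Claim_equal_determine_K1 : Prop := ∀ (max : Int) (R : Int), Dom_determine_K1 max R → Spec_determine_K1 max R (determine_K1 max R)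

-- ===== LEMMAS AND PROOFS =====

-- the condition of A, with squares written as products (Bool-valued, used for filtering)
def cAb (R i j k : Int) : Bool := decide (0 < i*i + j*j + k*k ∧ i*i + j*j + k*k ≤ R*R)

-- the triples A collects for a fixed (i, j)
def kList (max R i j : Int) : List (Int × Int × Int) :=
  ((PySem.List.pyRange 0 (max+1) 1).filter (cAb R i j)).map (fun k => (i, j, k))

-- all triples A collects, in A's order
def ptsA (max R : Int) : List (Int × Int × Int) :=
  (PySem.List.pyRange 0 (max+1) 1).flatMap (fun i =>
    (PySem.List.pyRange 0 (max+1) 1).flatMap (fun j => kList max R i j))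

-- A's three accumulators, appended componentwise
def app3 (s : List Int × List Int × List Int) (L : List (Int × Int × Int)) :
    List Int × List Int × List Int :=
  (s.1 ++ L.map (fun p => p.1), s.2.1 ++ L.map (fun p => p.2.1), s.2.2 ++ L.map (fun p => p.2.2))

theorem app3_app3 (s : List Int × List Int × List Int) (L M : List (Int × Int × Int)) :
    app3 (app3 s L) M = app3 s (L ++ M) := by
  simp [app3, List.append_assoc]

-- A's innermost loop
theorem A_k (R i j : Int) (ks : List Int) (s : List Int × List Int × List Int) :
    ks.foldl (fun s k =>
        if 0 < i^2 + j^2 + k^2 ∧ i^2 + j^2 + k^2 ≤ R^2 then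
          (s.1 ++ [i], s.2.1 ++ [j], s.2.2 ++ [k])
        else s) s
      = app3 s ((ks.filter (cAb R i j)).map (fun k => (i, j, k))) := by
  induction ks generalizing s with
  | nil => simp [app3]
  | cons k ks ih =>
    by_cases h : cAb R i j k = true
    · have h' : 0 < i^2 + j^2 + k^2 ∧ i^2 + j^2 + k^2 ≤ R^2 := by
        simpa [cAb, pow_two] using h
      simp only [List.foldl_cons, List.filter_cons, h, if_pos h', if_true, ih, app3]
      simp [List.append_assoc]
    · have h' : ¬(0 < i^2 + j^2 + k^2 ∧ i^2 + j^2 + k^2 ≤ R^2) := by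
        simpa [cAb, pow_two] using h
      simp only [List.foldl_cons, List.filter_cons, if_neg h', ih]
      rw [if_neg h]

-- folding app3 of per-element lists is app3 of the flatMap
theorem A_flat (L : List Int) (g : Int → List (Int × Int × Int))
    (s : List Int × List Int × List Int) :
    L.foldl (fun s x => app3 s (g x)) s = app3 s (L.flatMap g) := by
  induction L generalizing s with
  | nil => simp [app3]
  | cons x L ih => simp [ih, app3_app3]

-- A computes the componentwise projections of ptsA
theorem A_eq (max R : Int) : determine_K1 max R = app3 ([], [], []) (ptsA max R) := by
  unfold determine_K1 ptsA
  simp only [A_k]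
  have : ∀ i, (fun (s : List Int × List Int × List Int) j =>
      app3 s ((((PySem.List.pyRange 0 (max+1) 1).filter (cAb R i j)).map
        (fun k => (i, j, k))))) = fun s j => app3 s (kList max R i j) := by
    intro i; rfl
  simp only [this, A_flat]

theorem mul_self_le_mul_self' {a b : Int} (h0 : 0 ≤ a) (h : a ≤ b) : a*a ≤ b*b :=
  mul_le_mul h h h0 (h0.trans h)

-- B's inner while loop collects exactly the k in [k0, max] with sum of squares ≤ R2
theorem B_k (max R2 i j k0 : Int) (hk0 : 0 ≤ k0) :
    bLoopK max R2 i j k0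
      = ((PySem.List.pyRange k0 (max+1) 1).filter
          (fun k => decide (i*i + j*j + k*k ≤ R2))).map (fun k => (i, j, k)) := by
  rw [bLoopK]
  by_cases h : k0 ≤ max ∧ i*i + j*j + k0*k0 ≤ R2
  · rw [dif_pos h, B_k max R2 i j (k0+1) (by omega),
      PySem.List.pyRange_one_cons (by omega : k0 < max + 1)]
    simp [h.2]
  · rw [dif_neg h]
    symm
    rw [List.map_eq_nil_iff, List.filter_eq_nil_iff]
    intro k hk
    rw [PySem.List.mem_pyRange_one] at hk
    rcases not_and_or.mp h with h1 | h2
    · omega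
    · have : k0*k0 ≤ k*k := mul_self_le_mul_self' hk0 hk.1
      simp only [decide_eq_true_eq]
      omega
termination_by (max + 1 - k0).toNat
decreasing_by obtain ⟨h1, -⟩ := h; omega

-- with the computed start index, B's inner loop equals A's kList
theorem B_kfull (max R i j : Int) (hi : 0 ≤ i) (hj : 0 ≤ j) :
    bLoopK max (R*R) i j (if i = 0 ∧ j = 0 then 1 else 0) = kList max R i j := by
  by_cases hij : i = 0 ∧ j = 0
  · obtain ⟨rfl, rfl⟩ := hij
    rw [if_pos ⟨rfl, rfl⟩, B_k max (R*R) 0 0 1 (by omega)]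
    unfold kList
    by_cases hm : 0 < max + 1
    · rw [PySem.List.pyRange_one_cons hm]
      have h0 : cAb R 0 0 0 = false := by simp [cAb]
      rw [List.filter_cons, h0]
      simp only [Bool.false_eq_true, if_false]
      congr 1
      apply List.filter_congr
      intro k hk
      rw [PySem.List.mem_pyRange_one] at hk
      have hkk : 0 < k*k := mul_pos (by omega) (by omega)
      simp [cAb, hkk]
    · rw [PySem.List.pyRange_one_eq_nil (by omega), PySem.List.pyRange_one_eq_nil (by omega)]
      simp
  · rw [if_neg hij, B_k max (R*R) i j 0 le_rfl]
    unfold kList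
    congr 1
    apply List.filter_congr
    intro k hk
    have hij2 : 0 < i*i + j*j := by
      rcases not_and_or.mp hij with h1 | h1
      · have h2 : 0 < i*i := mul_pos (by omega) (by omega)
        linarith [mul_self_nonneg j]
      · have h2 : 0 < j*j := mul_pos (by omega) (by omega)
        linarith [mul_self_nonneg i]
    have hkk : 0 ≤ k*k := mul_self_nonneg k
    simp only [cAb, decide_eq_decide]
    omega

-- B's middle loop equals A's full j-scan (tail past the stop point contributes nothing)
theorem B_j (max R i j0 : Int) (hi : 0 ≤ i) (hj0 : 0 ≤ j0) :
    bLoopJ max (R*R) i j0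
      = (PySem.List.pyRange j0 (max+1) 1).flatMap (fun j => kList max R i j) := by
  rw [bLoopJ]
  by_cases h : j0 ≤ max ∧ i*i + j0*j0 ≤ R*R
  · rw [dif_pos h, B_kfull max R i j0 hi hj0, B_j max R i (j0+1) hi (by omega),
      PySem.List.pyRange_one_cons (by omega : j0 < max + 1)]
    simp
  · rw [dif_neg h]
    symm
    rw [List.flatMap_eq_nil_iff]
    intro j hj
    rw [PySem.List.mem_pyRange_one] at hj
    rcases not_and_or.mp h with h1 | h2
    · omega
    · unfold kList
      rw [List.map_eq_nil_iff, List.filter_eq_nil_iff]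
      intro k hk
      have hjj : j0*j0 ≤ j*j := mul_self_le_mul_self' hj0 hj.1
      have hkk : 0 ≤ k*k := mul_self_nonneg k
      simp only [cAb, decide_eq_true_eq, not_and]
      intro _
      omega
termination_by (max + 1 - j0).toNat
decreasing_by obtain ⟨h1, -⟩ := h; omega

-- B's outer loop equals ptsA from i0 on
theorem B_i (max R i0 : Int) (hi0 : 0 ≤ i0) :
    bLoopI max (R*R) i0
      = (PySem.List.pyRange i0 (max+1) 1).flatMap (fun i =>
          (PySem.List.pyRange 0 (max+1) 1).flatMap (fun j => kList max R i j)) := by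
  rw [bLoopI]
  by_cases h : i0 ≤ max ∧ i0*i0 ≤ R*R
  · rw [dif_pos h, B_j max R i0 0 hi0 le_rfl, B_i max R (i0+1) (by omega),
      PySem.List.pyRange_one_cons (by omega : i0 < max + 1)]
    simp
  · rw [dif_neg h]
    symm
    rw [List.flatMap_eq_nil_iff]
    intro i hi
    rw [PySem.List.mem_pyRange_one] at hi
    rcases not_and_or.mp h with h1 | h2
    · omega
    · rw [List.flatMap_eq_nil_iff]
      intro j hj
      unfold kList
      rw [List.map_eq_nil_iff, List.filter_eq_nil_iff]
      intro k hk
      have hii : i0*i0 ≤ i*i := mul_self_le_mul_self' hi0 hi.1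
      have hjj : 0 ≤ j*j := mul_self_nonneg j
      have hkk : 0 ≤ k*k := mul_self_nonneg k
      simp only [cAb, decide_eq_true_eq, not_and]
      intro _
      omega
termination_by (max + 1 - i0).toNat
decreasing_by obtain ⟨h1, -⟩ := h; omega

theorem B_eq (max R : Int) : determine_K1_alt max R = app3 ([], [], []) (ptsA max R) := by
  have hrfl : determine_K1_alt max R
      = ((bLoopI max (R*R) 0).map (fun p => p.1), (bLoopI max (R*R) 0).map (fun p => p.2.1),
         (bLoopI max (R*R) 0).map (fun p => p.2.2)) := rfl
  rw [hrfl, B_i max R 0 le_rfl]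
  simp [app3, ptsA]

-- ===== VERDICT (by name: the statement is the Claim_ definition above) =====
theorem determine_K1_spec : Claim_equal_determine_K1 := by
  intro max R _
  unfold Spec_determine_K1
  rw [A_eq, B_eq]
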